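-- pv_equiv track=rewrite | github.com/MysteriousShadow/Day23-Writeup | solve.py | enumerate_groupings
-- ===== SOURCE A (Python) =====
-- from itertools import product
--
-- def str_insert(source_str, insert_str, pos):
--     #https://stackoverflow.com/questions/4022827/insert-some-string-into-given-string-at-given-index
--     return source_str[:pos] + insert_str + source_str[pos:]
--
-- def enumerate_groupings(group):
--     """
--     For a group with N number of elements, there are N-1 slots for dividers.
--     Each slot either has or does not have a divider, therefore having 2 possibilites.
--     The total number of possibilites becomes 2**(N-1)
--     """
--     leading_negative=False
--     if group[0]=="-":
--         leading_negative=True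
--         group=group[1:]
--
--     inital_group=group
--     groupings=[]
--     for dividers in [''.join(p) for p in product('10', repeat=(len(group)-1))]:
--         #https://stackoverflow.com/questions/30442808/create-list-of-binary-strings-python
--         group=inital_group
--         index_acc=0
--         for i,divider in enumerate(dividers):
--             if divider=="1":
--                 group=str_insert(group," ",i+1+index_acc)
--                 index_acc+=1
--
--         if leading_negative:
--             group="-"+group
--
--         groupings.append(group)
--
--     return groupings
-- ===== SOURCE B (Python) =====
-- def _split(s):
--     # all ways to insert spaces into the divider slots of s
--     if len(s) <= 1:
--         return [s]
--     tails = _split(s[1:])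
--     return [s[0] + " " + g for g in tails] + [s[0] + g for g in tails]
--
--
-- def enumerate_groupings(group):
--     if group and group[0] == "-":
--         return ["-" + g for g in _split(group[1:])]
--     return _split(group)
-- ===== Notes on version B (the rewrite author's own statement) =====
-- stated objective: alternative
-- what changed: Replaces the explicit enumeration of all 2^(n-1) binary divider masks with per-mask positional re-insertion by a direct recursion on the string that builds each grouping once (space/no-space after the first character, recurse on the rest).
-- outside the precondition, e.g. on enumerate_groupings(''): A raises IndexError, B returns ['']; on enumerate_groupings('-'): A raises ValueError, B returns ['-']
-- crash fix: A raises IndexError on '' and ValueError on '-' (product with repeat=-1); B returns [''] and ['-'] respectively. — e.g. on enumerate_groupings("-"): A raises ValueError, B returns ["-"]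
import Mathlib
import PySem

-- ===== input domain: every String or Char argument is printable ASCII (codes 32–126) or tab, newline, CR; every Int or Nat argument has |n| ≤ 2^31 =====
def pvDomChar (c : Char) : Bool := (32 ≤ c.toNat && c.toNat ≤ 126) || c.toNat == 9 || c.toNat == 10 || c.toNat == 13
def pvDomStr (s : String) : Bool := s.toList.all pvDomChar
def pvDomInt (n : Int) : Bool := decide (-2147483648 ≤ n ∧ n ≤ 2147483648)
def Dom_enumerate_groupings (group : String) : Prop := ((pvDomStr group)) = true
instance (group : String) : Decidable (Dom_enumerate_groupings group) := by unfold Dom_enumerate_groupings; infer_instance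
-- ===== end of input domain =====

-- B replaces A's enumeration of binary divider masks (re-applied by positional
-- insertion) with a direct recursion on the string; equivalence of return values
-- is proved on Pre_ (A raises on "" and "-").

-- ===== PORT A =====
-- str_insert, on the code-point list of the string
def str_insert (source_str insert_str : List Char) (pos : Int) : List Char :=
  PySem.List.slice source_str none (some pos) ++ insert_str ++ PySem.List.slice source_str (some pos) none

-- ''.join over product('10', repeat=n): all length-n strings over '1','0', '1' first, leftmost most significant
def pvProdA : Nat → List (List Char)
  | 0 => [[]]
  | n+1 => (pvProdA n).map (fun p => '1' :: p) ++ (pvProdA n).map (fun p => '0' :: p)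

-- the body of A's inner 'for i, divider in enumerate(dividers)' loop, state = (group, index_acc)
def pvStepA (st : List Char × Int) (p : Int × Char) : List Char × Int :=
  if p.2 = '1' then (str_insert st.1 [' '] (p.1 + 1 + st.2), st.2 + 1) else st

def enumerate_groupings (group : String) : List String :=
  let cs := group.toList
  let ld := if PySem.List.pyGet? cs 0 = some '-' then (true, PySem.List.slice cs (some 1) none) else (false, cs)
  let leading_negative := ld.1
  let inital_group := ld.2
  (pvProdA (inital_group.length - 1)).map (fun dividers =>
    let g := ((PySem.List.enumerate dividers).foldl pvStepA (inital_group, 0)).1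
    String.mk (if leading_negative then '-' :: g else g))

-- ===== PORT B =====
-- _split: all ways to insert spaces into the divider slots of s
def pvSplitB : List Char → List (List Char)
  | [] => [[]]
  | [c] => [[c]]
  | c :: d :: rest =>
    let tails := pvSplitB (d :: rest)
    tails.map (fun g => c :: ' ' :: g) ++ tails.map (fun g => c :: g)

def enumerate_groupings_alt (group : String) : List String :=
  let cs := group.toList
  if PySem.List.pyGet? cs 0 = some '-' then
    (pvSplitB (cs.drop 1)).map (fun g => String.mk ('-' :: g))
  else
    (pvSplitB cs).map String.mk

-- ===== PRECONDITION & SPEC =====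
-- Pre_ excludes exactly "" (A raises IndexError on group[0]) and "-" (stripped group is
-- empty, product(repeat=-1) raises ValueError); A raises on both, returning on all other inputs.
def Pre_enumerate_groupings (group : String) : Prop :=
  group.toList ≠ [] ∧ group.toList ≠ ['-']
instance (group : String) : Decidable (Pre_enumerate_groupings group) := by
  unfold Pre_enumerate_groupings; infer_instance

def pvWitness_enumerate_groupings : String := "-ab"

-- A raises (IndexError on "", ValueError on "-") where B returns [""] resp. ["-"].
def Raises_enumerate_groupings (group : String) : Prop :=
  group.toList = [] ∨ group.toList = ['-']
instance (group : String) : Decidable (Raises_enumerate_groupings group) := by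
  unfold Raises_enumerate_groupings; infer_instance
def pvRaiseWitness_enumerate_groupings : String := "-"
def pvRaiseWitnessOut_enumerate_groupings : List String := ["-"]

def Spec_enumerate_groupings (group : String) (out : List String) : Prop := out = enumerate_groupings_alt group
instance (group : String) (out : List String) : Decidable (Spec_enumerate_groupings group out) := by unfold Spec_enumerate_groupings; infer_instance

-- ===== CLAIM (what is proved, stated in full; the proofs are below) =====
def Claim_equal_enumerate_groupings : Prop := ∀ (group : String), Dom_enumerate_groupings group → Pre_enumerate_groupings group → Spec_enumerate_groupings group (enumerate_groupings group)

def Claim_raises_enumerate_groupings : Prop := (∀ (group : String), Dom_enumerate_groupings group → Raises_enumerate_groupings group → ¬ Pre_enumerate_groupings group) ∧ (Dom_enumerate_groupings (pvRaiseWitness_enumerate_groupings) ∧ Raises_enumerate_groupings (pvRaiseWitness_enumerate_groupings) ∧ enumerate_groupings_alt (pvRaiseWitness_enumerate_groupings) = pvRaiseWitnessOut_enumerate_groupings)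

-- ===== LEMMAS AND PROOFS =====

-- the woven result of A's inner loop on the tail of the group
def pvWv : List Char → List Char → List Char
  | s, [] => s
  | [], _ :: _ => []
  | c :: t, x :: d => if x = '1' then ' ' :: c :: pvWv t d else c :: pvWv t d

lemma pvStepA_one (P s : List Char) (j a : Int) (h : j + 1 + a = P.length) :
    pvStepA (P ++ s, a) (j, '1') = (P ++ ' ' :: s, a + 1) := by
  simp only [pvStepA, str_insert, if_true]
  rw [h]
  simp [pysem]

lemma foldA_eq_wv : ∀ (d : List Char) (j a : Int) (P s : List Char),
    j + 1 + a = P.length → d.length ≤ s.length →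
    ((PySem.List.enumerate d j).foldl pvStepA (P ++ s, a)).1 = P ++ pvWv s d := by
  intro d
  induction d with
  | nil => intro j a P s _ _; simp [PySem.List.enumerate, pvWv]
  | cons x d ih =>
    intro j a P s hj hs
    cases s with
    | nil => simp at hs
    | cons c t =>
      have henum : PySem.List.enumerate (x :: d) j = (j, x) :: PySem.List.enumerate d (j + 1) := rfl
      rw [henum, List.foldl_cons]
      by_cases hx : x = '1'
      · subst hx
        rw [pvStepA_one P (c :: t) j a hj]
        have h1 : P ++ ' ' :: c :: t = (P ++ [' ', c]) ++ t := by simp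
        have h2 : j + 1 + 1 + (a + 1) = ((P ++ [' ', c]).length : Int) := by
          simp; omega
        rw [h1, ih (j + 1) (a + 1) (P ++ [' ', c]) t h2 (by simpa using hs)]
        simp [pvWv]
      · have hstep : pvStepA (P ++ c :: t, a) (j, x) = (P ++ c :: t, a) := by
          simp [pvStepA, hx]
        have h1 : P ++ c :: t = (P ++ [c]) ++ t := by simp
        have h2 : j + 1 + 1 + a = ((P ++ [c]).length : Int) := by simp; omega
        rw [hstep, h1, ih (j + 1) a (P ++ [c]) t h2 (by simpa using hs)]
        simp [pvWv, hx]

lemma length_mem_pvProdA : ∀ (n : Nat) (d : List Char), d ∈ pvProdA n → d.length = n := by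
  intro n
  induction n with
  | zero => intro d hd; simp [pvProdA] at hd; simp [hd]
  | succ n ih =>
    intro d hd
    simp [pvProdA] at hd
    rcases hd with ⟨p, hp, rfl⟩ | ⟨p, hp, rfl⟩ <;> simp [ih p hp]

lemma prodA_map_wv : ∀ (rest : List Char) (c : Char),
    (pvProdA rest.length).map (fun d => c :: pvWv rest d) = pvSplitB (c :: rest) := by
  intro rest
  induction rest with
  | nil => intro c; simp [pvProdA, pvWv, pvSplitB]
  | cons c2 rest ih =>
    intro c
    simp only [List.length_cons, pvProdA, List.map_append, List.map_map, pvSplitB]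
    rw [← ih c2]
    simp [Function.comp_def, pvWv]

-- A's inner loop over one divider string equals the weave, for groups of matching length
lemma foldA_top (c : Char) (rest d : List Char) (hd : d.length ≤ rest.length) :
    ((PySem.List.enumerate d).foldl pvStepA (c :: rest, 0)).1 = c :: pvWv rest d := by
  have := foldA_eq_wv d 0 0 [c] rest (by simp) hd
  simpa using this

lemma core_eq (c : Char) (rest : List Char) :
    (pvProdA ((c :: rest).length - 1)).map
        (fun d => ((PySem.List.enumerate d).foldl pvStepA (c :: rest, 0)).1)
      = pvSplitB (c :: rest) := by
  have hcongr : (pvProdA rest.length).map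
      (fun d => ((PySem.List.enumerate d).foldl pvStepA (c :: rest, 0)).1)
      = (pvProdA rest.length).map (fun d => c :: pvWv rest d) := by
    apply List.map_congr_left
    intro d hd
    exact foldA_top c rest d (le_of_eq (length_mem_pvProdA _ d hd))
  simpa [hcongr] using prodA_map_wv rest c

-- ===== VERDICT (by name: the statement is the Claim_ definition above) =====
theorem enumerate_groupings_spec : Claim_equal_enumerate_groupings := by
  intro group _ hpre
  unfold Spec_enumerate_groupings enumerate_groupings enumerate_groupings_alt
  obtain ⟨hne, hnd⟩ := hpre
  cases hcs : group.toList with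
  | nil => exact absurd hcs hne
  | cons c0 cs0 =>
    by_cases hneg : PySem.List.pyGet? (c0 :: cs0) 0 = some '-'
    · have hc0 : c0 = '-' := by simpa [PySem.List.pyGet?, PySem.List.pyIdx?] using hneg
      cases cs0 with
      | nil => exact absurd (by rw [hcs, hc0]) hnd
      | cons c1 rest =>
        have hsl : PySem.List.slice (c0 :: c1 :: rest) (some 1) none = c1 :: rest := by
          simp [pysem]
        simp only [hneg, if_pos, hsl, List.drop_succ_cons, List.drop_zero]
        rw [← core_eq c1 rest]
        simp [List.map_map, Function.comp]
    · simp only [hneg, if_false]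
      rw [← core_eq c0 cs0]
      simp [List.map_map, Function.comp]

@[simp] theorem enumerate_groupings_raises : Claim_raises_enumerate_groupings := by
  unfold Claim_raises_enumerate_groupings
  constructor
  · intro group _ hr hp
    rcases hr with h | h
    · exact hp.1 h
    · exact hp.2 h
  · exact ⟨by decide, by decide, by decide⟩
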